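-- pv_equiv track=rewrite | github.com/Sachin-bhati3824/Python_fun_projects | qr code/Main file.py | draw_the_line
-- ===== SOURCE A (Python) =====
-- def draw_the_line(matrix,x,size,orientation,int):
--     if orientation == "x":
--         if int == 0 :
--             for i in range(size):
--                 matrix[i][x] = 0
--         if int == 1 :
--             for i in range(size):
--                 matrix[i][x] = 1
--         if int == 7 :
--             for i in range(size):
--                 matrix[i][x] = 7
--         if int ==-11:
--             flag_a = True
--             for i in range(size):
--                 if flag_a :
--                     matrix[i][x] = 1
--                     flag_a = False
--                     continue
--                 if not flag_a:
--                     matrix[i][x] = 0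
--                     flag_a = True
--                     continue
--         if int ==-10:
--             flag_b = True
--             for i in range(size):
--                 if flag_b :
--                     matrix[i][x] = 0
--                     flag_b = False
--                     continue
--                 if not flag_b:
--                     matrix[i][x] = 1
--                     flag_b = True
--                     continue
--     if orientation == "y":
--         if int == 0 :
--             for i in range(size):
--                 matrix[x][i] = 0
--         if int == 1 :
--             for i in range(size):
--                 matrix[x][i] = 1
--         if int == 7 :
--             for i in range(size):
--                 matrix[x][i] = 7
--         if int ==-11:
--             flag_a = True
--             for i in range(size):
--                 if flag_a :
--                     matrix[x][i] = 1
--                     flag_a = False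
--                     continue
--                 if not flag_a:
--                     matrix[x][i] = 0
--                     flag_a = True
--                     continue
--         if int ==-10:
--             flag_b = True
--             for i in range(size):
--                 if flag_b :
--                     matrix[x][i] = 0
--                     flag_b = False
--                     continue
--                 if not flag_b:
--                     matrix[x][i] = 1
--                     flag_b = True
--                     continue
--     return matrix
-- ===== SOURCE B (Python) =====
-- # Staged decomposition: first BUILD the whole value pattern as a list (tiling + slicing,
-- # no per-index branching), then SPLICE it into the matrix in one bulk step (zip for a
-- # column, slice assignment for a row).  Like A, mutates `matrix` in place and returns it.
--
-- def draw_the_line(matrix, x, size, orientation, int):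
--     n = max(size, 0)
--     if int in (0, 1, 7):
--         pat = [int] * n
--     elif int == -11:
--         pat = ([1, 0] * n)[:n]
--     elif int == -10:
--         pat = ([0, 1] * n)[:n]
--     else:
--         return matrix
--     if orientation == "x":
--         for row, v in zip(matrix, pat):
--             row[x] = v
--     elif orientation == "y" and pat:
--         matrix[x][:len(pat)] = pat
--     return matrix
-- ===== Notes on version B (the rewrite author's own statement) =====
-- stated objective: alternative
-- what changed: Replaces A's ten branch-specific in-place write loops (two driven by an alternating boolean flag) with a staged pipeline: build the whole value pattern once as a list (constant replication, or tiling [1,0]/[0,1] and slicing to length), then splice it into the matrix in one bulk step (zip over rows for a column, slice assignment for a row).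
import Mathlib
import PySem

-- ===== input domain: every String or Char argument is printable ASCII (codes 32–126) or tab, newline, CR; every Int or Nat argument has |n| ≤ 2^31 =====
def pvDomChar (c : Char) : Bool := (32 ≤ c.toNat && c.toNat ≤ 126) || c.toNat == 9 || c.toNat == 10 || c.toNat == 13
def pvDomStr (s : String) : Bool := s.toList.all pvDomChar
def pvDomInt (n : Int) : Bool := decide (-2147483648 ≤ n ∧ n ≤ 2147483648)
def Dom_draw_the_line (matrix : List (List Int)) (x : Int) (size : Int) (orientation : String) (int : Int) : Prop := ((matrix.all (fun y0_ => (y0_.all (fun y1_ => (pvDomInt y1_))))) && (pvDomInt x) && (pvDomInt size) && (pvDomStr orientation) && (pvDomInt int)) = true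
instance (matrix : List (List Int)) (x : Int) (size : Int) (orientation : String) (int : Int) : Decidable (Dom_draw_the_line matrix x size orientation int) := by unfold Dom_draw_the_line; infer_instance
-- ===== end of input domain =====

-- B builds the whole value pattern first (replication/tiling + slice) and splices it into the
-- matrix in one bulk step, instead of A's ten branch-specific write loops (objective: alternative).
-- Both Pythons mutate `matrix` in place identically and return it; the equivalence proved is about the return value.

-- ===== PORT A =====
-- matrix[a][b] = v  (in-place write; total form of Python's write, exact under Pre_'s in-range condition)
def pvWrite (m : List (List Int)) (a b v : Int) : List (List Int) :=
  PySem.List.pySetD m a (PySem.List.pySetD (PySem.List.pyGetD m a []) b v)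

def draw_the_line (matrix : List (List Int)) (x : Int) (size : Int) (orientation : String) (int : Int) : List (List Int) :=
  let m1 :=
    if orientation = "x" then
      let a := if int = 0 then (PySem.List.pyRange 0 size 1).foldl (fun m i => pvWrite m i x 0) matrix else matrix
      let b := if int = 1 then (PySem.List.pyRange 0 size 1).foldl (fun m i => pvWrite m i x 1) a else a
      let c := if int = 7 then (PySem.List.pyRange 0 size 1).foldl (fun m i => pvWrite m i x 7) b else b
      let d := if int = -11 then
          ((PySem.List.pyRange 0 size 1).foldl
            (fun (p : List (List Int) × Bool) i =>
              if p.2 then (pvWrite p.1 i x 1, false) else (pvWrite p.1 i x 0, true)) (c, true)).1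
        else c
      let e := if int = -10 then
          ((PySem.List.pyRange 0 size 1).foldl
            (fun (p : List (List Int) × Bool) i =>
              if p.2 then (pvWrite p.1 i x 0, false) else (pvWrite p.1 i x 1, true)) (d, true)).1
        else d
      e
    else matrix
  if orientation = "y" then
    let a := if int = 0 then (PySem.List.pyRange 0 size 1).foldl (fun m i => pvWrite m x i 0) m1 else m1
    let b := if int = 1 then (PySem.List.pyRange 0 size 1).foldl (fun m i => pvWrite m x i 1) a else a
    let c := if int = 7 then (PySem.List.pyRange 0 size 1).foldl (fun m i => pvWrite m x i 7) b else b
    let d := if int = -11 then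
        ((PySem.List.pyRange 0 size 1).foldl
          (fun (p : List (List Int) × Bool) i =>
            if p.2 then (pvWrite p.1 x i 1, false) else (pvWrite p.1 x i 0, true)) (c, true)).1
      else c
    let e := if int = -10 then
        ((PySem.List.pyRange 0 size 1).foldl
          (fun (p : List (List Int) × Bool) i =>
            if p.2 then (pvWrite p.1 x i 0, false) else (pvWrite p.1 x i 1, true)) (d, true)).1
      else d
    e
  else m1

-- ===== PORT B =====
-- Source B: build the pattern list first ([v]*n, ([1,0]*n)[:n], ([0,1]*n)[:n]), then splice it in:
-- 'for row, v in zip(matrix, pat): row[x] = v' (its net effect on matrix: the first len(pat)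
-- rows updated in place, the rest untouched), resp. 'matrix[x][:len(pat)] = pat' (the row at
-- Python index x with its first len(pat) cells replaced).  list*n is n concatenated copies
-- (replicate+flatten), xs[:n] with n ≥ 0 is take n (= PySem.List.slice_to_natCast).
def draw_the_line_alt (matrix : List (List Int)) (x : Int) (size : Int) (orientation : String) (int : Int) : List (List Int) :=
  let n := (max size 0).toNat
  let pat? : Option (List Int) :=
    if int = 0 ∨ int = 1 ∨ int = 7 then some (List.replicate n int)
    else if int = -11 then some (((List.replicate n ([1, 0] : List Int)).flatten).take n)
    else if int = -10 then some (((List.replicate n ([0, 1] : List Int)).flatten).take n)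
    else none
  match pat? with
  | none => matrix
  | some pat =>
    if orientation = "x" then
      List.zipWith (fun row v => PySem.List.pySetD row x v) matrix pat ++ matrix.drop pat.length
    else if orientation = "y" ∧ pat ≠ [] then
      PySem.List.pySetD matrix x (pat ++ (PySem.List.pyGetD matrix x []).drop pat.length)
    else matrix

-- ===== PRECONDITION & SPEC =====
-- Pre_ excludes exactly the inputs on which Python A raises an IndexError: when a recognized
-- orientation/int combination makes A write, every touched index must be in Python range.
def Pre_draw_the_line (matrix : List (List Int)) (x : Int) (size : Int) (orientation : String) (int : Int) : Prop :=
  ((orientation = "x" ∧ (int = 0 ∨ int = 1 ∨ int = 7 ∨ int = -11 ∨ int = -10)) →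
     size ≤ (matrix.length : Int) ∧
     ∀ row ∈ matrix.take size.toNat, PySem.Raise.InRange row.length x) ∧
  ((orientation = "y" ∧ (int = 0 ∨ int = 1 ∨ int = 7 ∨ int = -11 ∨ int = -10)) → 0 < size →
     PySem.Raise.InRange matrix.length x ∧
     size ≤ ((PySem.List.pyGetD matrix x []).length : Int))
instance (matrix : List (List Int)) (x : Int) (size : Int) (orientation : String) (int : Int) : Decidable (Pre_draw_the_line matrix x size orientation int) := by unfold Pre_draw_the_line; infer_instance

def pvWitness_draw_the_line : List (List Int) × Int × Int × String × Int :=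
  ([[5, 5], [5, 5], [5, 5]], 1, 3, "x", -11)

def Spec_draw_the_line (matrix : List (List Int)) (x : Int) (size : Int) (orientation : String) (int : Int) (out : List (List Int)) : Prop := out = draw_the_line_alt matrix x size orientation int
instance (matrix : List (List Int)) (x : Int) (size : Int) (orientation : String) (int : Int) (out : List (List Int)) : Decidable (Spec_draw_the_line matrix x size orientation int out) := by unfold Spec_draw_the_line; infer_instance

-- ===== CLAIM (what is proved, stated in full; the proofs are below) =====
def Claim_equal_draw_the_line : Prop := ∀ (matrix : List (List Int)) (x : Int) (size : Int) (orientation : String) (int : Int), Dom_draw_the_line matrix x size orientation int → Pre_draw_the_line matrix x size orientation int → Spec_draw_the_line matrix x size orientation int (draw_the_line matrix x size orientation int)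

-- ===== LEMMAS AND PROOFS =====

-- Python-index normalisation: an in-range Int index denotes one Nat position, used by both get and set.
lemma pyIdx_norm {α : Type} (xs : List α) (i : Int) (h : PySem.Raise.InRange xs.length i) :
    ∃ k : Nat, k < xs.length ∧ PySem.List.pyIdx? xs.length i = some k := by
  obtain ⟨h1, h2⟩ := h
  by_cases h0 : 0 ≤ i
  · exact ⟨i.toNat, by omega, by simp [PySem.List.pyIdx?, h0, h2]⟩
  · exact ⟨xs.length - (-i).toNat, by omega, by simp [PySem.List.pyIdx?, h0]; omega⟩

lemma pyGetD_pySetD_self {α : Type} (xs : List α) (i : Int) (v d : α)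
    (h : PySem.Raise.InRange xs.length i) :
    PySem.List.pyGetD (PySem.List.pySetD xs i v) i d = v := by
  obtain ⟨k, hk, hidx⟩ := pyIdx_norm xs i h
  simp [PySem.List.pySetD, PySem.List.pySet?, PySem.List.pyGetD, PySem.List.pyGet?, hidx, hk]

lemma pySetD_pySetD_self {α : Type} (xs : List α) (i : Int) (v w : α)
    (h : PySem.Raise.InRange xs.length i) :
    PySem.List.pySetD (PySem.List.pySetD xs i v) i w = PySem.List.pySetD xs i w := by
  obtain ⟨k, -, hidx⟩ := pyIdx_norm xs i h
  simp [PySem.List.pySetD, PySem.List.pySet?, hidx, List.set_set]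

-- zipping against one more pattern element updates exactly one more row
lemma zipWith_snoc {α β γ : Type} (g : α → β → γ) :
    ∀ (l : List β) (xs : List α) (b : β) (k : Nat) (hk : l.length = k) (h : k < xs.length),
      List.zipWith g xs (l ++ [b]) = List.zipWith g xs l ++ [g (xs[k]'h) b] := by
  intro l
  induction l with
  | nil =>
      intro xs b k hk h
      subst hk
      cases xs with
      | nil => simp at h
      | cons a t => simp
  | cons c cl ih =>
      intro xs b k hk h
      cases xs with
      | nil => simp at h
      | cons a t =>
          subst hk
          simp only [List.cons_append, List.zipWith_cons_cons, List.length_cons]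
          rw [ih t b cl.length rfl (by simpa using h)]
          simp

-- writing f i at cell i, for i = 0..n-1, replaces the first n cells by the pattern
lemma fold_set_range (f : Int → Int) :
    ∀ (n : Nat) (xs : List Int), n ≤ xs.length →
      (PySem.List.pyRange 0 (n : Int) 1).foldl (fun r i => PySem.List.pySetD r i (f i)) xs
        = (PySem.List.pyRange 0 (n : Int) 1).map f ++ xs.drop n := by
  intro n
  induction n with
  | zero => intro xs _; rw [PySem.List.pyRange_one_eq_nil (by omega)]; simp
  | succ m ih =>
      intro xs hx
      have hcast : ((m + 1 : Nat) : Int) = (m : Int) + 1 := by push_cast; ring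
      rw [hcast, PySem.List.pyRange_one_succ_right (by positivity)]
      rw [List.foldl_append, List.map_append, ih xs (by omega)]
      have hm : m < xs.length := by omega
      have hlenP : ((PySem.List.pyRange 0 (m : Int) 1).map f).length = m := by
        simp [PySem.List.length_pyRange_one]
      rw [List.drop_eq_getElem_cons hm]
      simp only [List.foldl_cons, List.foldl_nil, PySem.List.pySetD_natCast]
      rw [List.set_append, hlenP]
      rw [if_neg (by omega), Nat.sub_self]
      simp only [List.set_cons_zero, List.map_cons, List.map_nil]
      rw [List.append_assoc, List.singleton_append]

-- writing f i into row i (at column x), for i = 0..n-1, is the zip-splice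
lemma fold_write_rows (x : Int) (f : Int → Int) :
    ∀ (n : Nat) (ms : List (List Int)), n ≤ ms.length →
      (PySem.List.pyRange 0 (n : Int) 1).foldl (fun m i => pvWrite m i x (f i)) ms
        = List.zipWith (fun row v => PySem.List.pySetD row x v) ms
            ((PySem.List.pyRange 0 (n : Int) 1).map f) ++ ms.drop n := by
  intro n
  induction n with
  | zero => intro ms _; rw [PySem.List.pyRange_one_eq_nil (by omega)]; simp
  | succ m ih =>
      intro ms hx
      have hcast : ((m + 1 : Nat) : Int) = (m : Int) + 1 := by push_cast; ring
      rw [hcast, PySem.List.pyRange_one_succ_right (by positivity)]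
      rw [List.foldl_append, List.map_append, ih ms (by omega)]
      have hm : m < ms.length := by omega
      set P : List Int := (PySem.List.pyRange 0 (m : Int) 1).map f with hP
      set g : List Int → Int → List Int := fun row v => PySem.List.pySetD row x v with hg
      have hPl : P.length = m := by
        rw [hP, List.length_map, PySem.List.length_pyRange_one]; omega
      have hZ : (List.zipWith g ms P).length = m := by
        rw [List.length_zipWith, hPl]; omega
      simp only [List.foldl_cons, List.foldl_nil, List.map_cons, List.map_nil]
      unfold pvWrite
      rw [PySem.List.pySetD_natCast, PySem.List.pyGetD_natCast]
      rw [List.getD_eq_getElem?_getD, List.getElem?_append_right (by omega), hZ, Nat.sub_self]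
      rw [List.drop_eq_getElem_cons hm]
      simp only [List.getElem?_cons_zero, Option.getD_some]
      rw [List.set_append, hZ]
      rw [if_neg (by omega), Nat.sub_self]
      rw [zipWith_snoc g P ms (f (m : Int)) m hPl hm]
      rw [List.set_cons_zero, List.append_assoc, List.singleton_append]

-- all writes of the y-branch land in the same outer row: the fold collapses to one pySetD
lemma y_inv (x : Int) (f : Int → Int) (matrix : List (List Int))
    (h : PySem.Raise.InRange matrix.length x) :
    ∀ (l : List Int) (r : List Int),
      l.foldl (fun m i => pvWrite m x i (f i)) (PySem.List.pySetD matrix x r)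
        = PySem.List.pySetD matrix x (l.foldl (fun r i => PySem.List.pySetD r i (f i)) r) := by
  intro l
  induction l with
  | nil => intro r; rfl
  | cons i t ih =>
      intro r
      simp only [List.foldl_cons]
      unfold pvWrite
      rw [pyGetD_pySetD_self matrix x r [] h, pySetD_pySetD_self matrix x r _ h]
      exact ih _

lemma y_collapse (x : Int) (f : Int → Int) (matrix : List (List Int)) (n : Nat)
    (hn : 0 < n) (h : PySem.Raise.InRange matrix.length x) :
    (PySem.List.pyRange 0 (n : Int) 1).foldl (fun m i => pvWrite m x i (f i)) matrix
      = PySem.List.pySetD matrix x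
          ((PySem.List.pyRange 0 (n : Int) 1).foldl (fun r i => PySem.List.pySetD r i (f i))
            (PySem.List.pyGetD matrix x [])) := by
  rw [PySem.List.pyRange_one_cons (by exact_mod_cast hn)]
  simp only [List.foldl_cons]
  have h0 : pvWrite matrix x 0 (f 0)
      = PySem.List.pySetD matrix x (PySem.List.pySetD (PySem.List.pyGetD matrix x []) 0 (f 0)) := rfl
  rw [h0]
  exact y_inv x f matrix h _ _

-- tiling [a,b] n times and truncating to n gives the parity pattern
lemma tile_take (a b : Int) :
    ∀ (m n : Nat), n ≤ 2 * m →
      ((List.replicate m ([a, b] : List Int)).flatten).take n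
        = (List.range n).map (fun k => if k % 2 = 0 then a else b) := by
  intro m
  induction m with
  | zero => intro n hn; interval_cases n; simp
  | succ p ih =>
      intro n hn
      match n with
      | 0 => simp
      | 1 => simp [List.replicate_succ]
      | (k + 2) =>
          rw [List.replicate_succ, List.flatten_cons]
          have : ([a, b] ++ (List.replicate p ([a, b] : List Int)).flatten).take (k + 2)
              = a :: b :: ((List.replicate p ([a, b] : List Int)).flatten).take k := by simp
          rw [this, ih k (by omega)]
          rw [show k + 2 = k + 1 + 1 from rfl, List.range_succ_eq_map, List.range_succ_eq_map]
          simp only [List.map_cons, List.map_map]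
          norm_num
          intro j hj
          split_ifs with h1 h2 <;> first | rfl | omega

-- range(size) only depends on max(size, 0)
lemma pyRange_toNat (size : Int) :
    PySem.List.pyRange 0 size 1 = PySem.List.pyRange 0 ((size.toNat : Nat) : Int) 1 := by
  by_cases h : 0 ≤ size
  · rw [Int.toNat_of_nonneg h]
  · rw [PySem.List.pyRange_one_eq_nil (by omega), PySem.List.pyRange_one_eq_nil (by omega)]

-- the concrete patterns are maps over the range
lemma pat_const (c : Int) (n : Nat) :
    List.replicate n c = (PySem.List.pyRange 0 (n : Int) 1).map (fun _ => c) := by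
  symm
  rw [List.eq_replicate_iff]
  refine ⟨by rw [List.length_map, PySem.List.length_pyRange_one]; omega, ?_⟩
  intro b hb
  rcases List.mem_map.mp hb with ⟨_, -, hc⟩
  exact hc.symm

lemma pat_alt (a b : Int) (n : Nat) :
    ((List.replicate n ([a, b] : List Int)).flatten).take n
      = (PySem.List.pyRange 0 (n : Int) 1).map (fun i => if i % 2 = 0 then a else b) := by
  rw [tile_take a b n n (by omega), PySem.List.pyRange_one]
  simp only [List.map_map]
  apply List.map_congr_left
  intro j _
  simp only [Function.comp, zero_add]
  split_ifs with h1 h2 <;> first | rfl | omega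

-- A's alternating-flag loop equals the parity-driven loop, for any write action w.
lemma flag_fold (w : List (List Int) → Int → Int → List (List Int)) (ev od : Int) :
    ∀ (n : Nat) (a b : Int), (b - a).toNat = n → ∀ (m : List (List Int)) (flag : Bool),
      flag = decide (a % 2 = 0) →
      ((PySem.List.pyRange a b 1).foldl
        (fun (p : List (List Int) × Bool) i =>
          if p.2 then (w p.1 i ev, false) else (w p.1 i od, true)) (m, flag)).1
      = (PySem.List.pyRange a b 1).foldl
          (fun m i => w m i (if i % 2 = 0 then ev else od)) m := by
  intro n
  induction n with
  | zero =>
      intro a b hb m flag hf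
      rw [PySem.List.pyRange_one_eq_nil (by omega)]
      simp
  | succ k ih =>
      intro a b hb m flag hf
      rw [PySem.List.pyRange_one_cons (by omega)]
      simp only [List.foldl_cons]
      by_cases ha : a % 2 = 0
      · rw [if_pos ha]
        have hfl : flag = true := by simp [hf, ha]
        rw [hfl]
        simp only [if_true]
        have h1 : ¬ ((a + 1) % 2 = 0) := by omega
        exact ih (a + 1) b (by omega) (w m a ev) false (decide_eq_false h1).symm
      · rw [if_neg ha]
        have hfl : flag = false := by simp [hf, ha]
        rw [hfl]
        simp only [show ((false : Bool) = true) = False from by simp, if_false]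
        have h1 : (a + 1) % 2 = 0 := by omega
        exact ih (a + 1) b (by omega) (w m a od) true (by simp [h1])

-- the x-orientation: A's row-by-row write loop equals B's zip-splice
lemma xcase (matrix : List (List Int)) (x size : Int) (f : Int → Int) (pat : List Int)
    (hlen : size ≤ (matrix.length : Int))
    (hpat : pat = (PySem.List.pyRange 0 ((size.toNat : Nat) : Int) 1).map f) :
    (PySem.List.pyRange 0 size 1).foldl (fun m i => pvWrite m i x (f i)) matrix
      = List.zipWith (fun row v => PySem.List.pySetD row x v) matrix pat ++ matrix.drop pat.length := by
  rw [pyRange_toNat, hpat]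
  have hplen : ((PySem.List.pyRange 0 ((size.toNat : Nat) : Int) 1).map f).length = size.toNat := by
    rw [List.length_map, PySem.List.length_pyRange_one]; omega
  rw [hplen]
  exact fold_write_rows x f size.toNat matrix (by omega)

-- the y-orientation: A's cell-by-cell write loop equals B's slice assignment
lemma ycase (matrix : List (List Int)) (x size : Int) (f : Int → Int) (pat : List Int)
    (hx : 0 < size → PySem.Raise.InRange matrix.length x)
    (hlen : 0 < size → size ≤ ((PySem.List.pyGetD matrix x []).length : Int))
    (hpat : pat = (PySem.List.pyRange 0 ((size.toNat : Nat) : Int) 1).map f) :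
    (PySem.List.pyRange 0 size 1).foldl (fun m i => pvWrite m x i (f i)) matrix
      = if pat ≠ [] then
          PySem.List.pySetD matrix x (pat ++ (PySem.List.pyGetD matrix x []).drop pat.length)
        else matrix := by
  by_cases hs : 0 < size
  · have hn : 0 < size.toNat := by omega
    have hplen : ((PySem.List.pyRange 0 ((size.toNat : Nat) : Int) 1).map f).length = size.toNat := by
      rw [List.length_map, PySem.List.length_pyRange_one]; omega
    have hne : pat ≠ [] := by
      intro hE
      rw [hE] at hpat
      rw [← hpat] at hplen
      simp at hplen
      omega
    rw [if_pos hne, pyRange_toNat]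
    rw [y_collapse x f matrix size.toNat hn (hx hs)]
    rw [fold_set_range f size.toNat (PySem.List.pyGetD matrix x []) (by have := hlen hs; omega)]
    rw [hpat, hplen]
  · have h0 : size.toNat = 0 := by omega
    have hE : pat = [] := by
      rw [hpat, h0]
      simp [PySem.List.pyRange_one_eq_nil]
    rw [hE, if_neg (by simp)]
    rw [PySem.List.pyRange_one_eq_nil (by omega)]
    rfl

-- (if q ∧ p …) with q known true reduces to (if p …)
lemma if_true_and {α : Type} (p : Prop) [Decidable p] (a b : α) (q : Prop) [Decidable q] (hq : q) :
    (if q ∧ p then a else b) = if p then a else b := by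
  by_cases hp : p
  · rw [if_pos ⟨hq, hp⟩, if_pos hp]
  · rw [if_neg (fun h => hp h.2), if_neg hp]

-- ===== VERDICT (by name: the statement is the Claim_ definition above) =====
theorem draw_the_line_spec : Claim_equal_draw_the_line := by
  intro matrix x size orientation int _ hpre
  obtain ⟨hpx, hpy⟩ := hpre
  unfold Spec_draw_the_line
  have hmax : ((max size 0).toNat : Nat) = size.toNat := by omega
  by_cases hx : orientation = "x"
  · subst hx
    by_cases h0 : int = (0 : Int)
    · subst h0
      have hlen := (hpx ⟨rfl, by norm_num⟩).1
      have hA : draw_the_line matrix x size "x" (0 : Int)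
          = (PySem.List.pyRange 0 size 1).foldl (fun m i => pvWrite m i x 0) matrix := rfl
      have hB : draw_the_line_alt matrix x size "x" (0 : Int)
          = List.zipWith (fun row v => PySem.List.pySetD row x v) matrix (List.replicate ((max size 0).toNat) (0 : Int))
            ++ matrix.drop ((List.replicate ((max size 0).toNat) (0 : Int)).length) := rfl
      rw [hA, hB]
      exact xcase matrix x size (fun _ => (0 : Int)) _ hlen (by rw [hmax]; exact pat_const 0 size.toNat)
    by_cases h1 : int = (1 : Int)
    · subst h1
      have hlen := (hpx ⟨rfl, by norm_num⟩).1
      have hA : draw_the_line matrix x size "x" (1 : Int)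
          = (PySem.List.pyRange 0 size 1).foldl (fun m i => pvWrite m i x 1) matrix := rfl
      have hB : draw_the_line_alt matrix x size "x" (1 : Int)
          = List.zipWith (fun row v => PySem.List.pySetD row x v) matrix (List.replicate ((max size 0).toNat) (1 : Int))
            ++ matrix.drop ((List.replicate ((max size 0).toNat) (1 : Int)).length) := rfl
      rw [hA, hB]
      exact xcase matrix x size (fun _ => (1 : Int)) _ hlen (by rw [hmax]; exact pat_const 1 size.toNat)
    by_cases h7 : int = (7 : Int)
    · subst h7
      have hlen := (hpx ⟨rfl, by norm_num⟩).1
      have hA : draw_the_line matrix x size "x" (7 : Int)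
          = (PySem.List.pyRange 0 size 1).foldl (fun m i => pvWrite m i x 7) matrix := rfl
      have hB : draw_the_line_alt matrix x size "x" (7 : Int)
          = List.zipWith (fun row v => PySem.List.pySetD row x v) matrix (List.replicate ((max size 0).toNat) (7 : Int))
            ++ matrix.drop ((List.replicate ((max size 0).toNat) (7 : Int)).length) := rfl
      rw [hA, hB]
      exact xcase matrix x size (fun _ => (7 : Int)) _ hlen (by rw [hmax]; exact pat_const 7 size.toNat)
    by_cases h11 : int = (-11 : Int)
    · subst h11
      have hlen := (hpx ⟨rfl, by norm_num⟩).1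
      have hA : draw_the_line matrix x size "x" (-11 : Int)
          = ((PySem.List.pyRange 0 size 1).foldl
              (fun (p : List (List Int) × Bool) i =>
                if p.2 then (pvWrite p.1 i x 1, false) else (pvWrite p.1 i x 0, true)) (matrix, true)).1 := rfl
      have hB : draw_the_line_alt matrix x size "x" (-11 : Int)
          = List.zipWith (fun row v => PySem.List.pySetD row x v) matrix (((List.replicate ((max size 0).toNat) ([1, 0] : List Int)).flatten).take ((max size 0).toNat))
            ++ matrix.drop ((((List.replicate ((max size 0).toNat) ([1, 0] : List Int)).flatten).take ((max size 0).toNat)).length) := rfl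
      rw [hA, flag_fold (fun m i v => pvWrite m i x v) 1 0 (size - 0).toNat 0 size rfl matrix true (by decide), hB]
      exact xcase matrix x size (fun i => if i % 2 = 0 then (1 : Int) else 0) _ hlen (by rw [hmax]; exact pat_alt 1 0 size.toNat)
    by_cases h10 : int = (-10 : Int)
    · subst h10
      have hlen := (hpx ⟨rfl, by norm_num⟩).1
      have hA : draw_the_line matrix x size "x" (-10 : Int)
          = ((PySem.List.pyRange 0 size 1).foldl
              (fun (p : List (List Int) × Bool) i =>
                if p.2 then (pvWrite p.1 i x 0, false) else (pvWrite p.1 i x 1, true)) (matrix, true)).1 := rfl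
      have hB : draw_the_line_alt matrix x size "x" (-10 : Int)
          = List.zipWith (fun row v => PySem.List.pySetD row x v) matrix (((List.replicate ((max size 0).toNat) ([0, 1] : List Int)).flatten).take ((max size 0).toNat))
            ++ matrix.drop ((((List.replicate ((max size 0).toNat) ([0, 1] : List Int)).flatten).take ((max size 0).toNat)).length) := rfl
      rw [hA, flag_fold (fun m i v => pvWrite m i x v) 0 1 (size - 0).toNat 0 size rfl matrix true (by decide), hB]
      exact xcase matrix x size (fun i => if i % 2 = 0 then (0 : Int) else 1) _ hlen (by rw [hmax]; exact pat_alt 0 1 size.toNat)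
    unfold draw_the_line draw_the_line_alt
    simp [h0, h1, h7, h11, h10]
  · by_cases hy : orientation = "y"
    · subst hy
      by_cases h0 : int = (0 : Int)
      · subst h0
        have hA : draw_the_line matrix x size "y" (0 : Int)
            = (PySem.List.pyRange 0 size 1).foldl (fun m i => pvWrite m x i 0) matrix := rfl
        have hB : draw_the_line_alt matrix x size "y" (0 : Int)
            = if (("y" : String) = "y") ∧ (List.replicate ((max size 0).toNat) (0 : Int)) ≠ [] then
                PySem.List.pySetD matrix x ((List.replicate ((max size 0).toNat) (0 : Int))
                  ++ (PySem.List.pyGetD matrix x []).drop ((List.replicate ((max size 0).toNat) (0 : Int)).length))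
              else matrix := rfl
        rw [hA, hB, if_true_and _ _ _ _ rfl]
        exact ycase matrix x size (fun _ => (0 : Int)) _
          (fun hs => (hpy ⟨rfl, by norm_num⟩ hs).1) (fun hs => (hpy ⟨rfl, by norm_num⟩ hs).2)
          (by rw [hmax]; exact pat_const 0 size.toNat)
      by_cases h1 : int = (1 : Int)
      · subst h1
        have hA : draw_the_line matrix x size "y" (1 : Int)
            = (PySem.List.pyRange 0 size 1).foldl (fun m i => pvWrite m x i 1) matrix := rfl
        have hB : draw_the_line_alt matrix x size "y" (1 : Int)
            = if (("y" : String) = "y") ∧ (List.replicate ((max size 0).toNat) (1 : Int)) ≠ [] then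
                PySem.List.pySetD matrix x ((List.replicate ((max size 0).toNat) (1 : Int))
                  ++ (PySem.List.pyGetD matrix x []).drop ((List.replicate ((max size 0).toNat) (1 : Int)).length))
              else matrix := rfl
        rw [hA, hB, if_true_and _ _ _ _ rfl]
        exact ycase matrix x size (fun _ => (1 : Int)) _
          (fun hs => (hpy ⟨rfl, by norm_num⟩ hs).1) (fun hs => (hpy ⟨rfl, by norm_num⟩ hs).2)
          (by rw [hmax]; exact pat_const 1 size.toNat)
      by_cases h7 : int = (7 : Int)
      · subst h7
        have hA : draw_the_line matrix x size "y" (7 : Int)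
            = (PySem.List.pyRange 0 size 1).foldl (fun m i => pvWrite m x i 7) matrix := rfl
        have hB : draw_the_line_alt matrix x size "y" (7 : Int)
            = if (("y" : String) = "y") ∧ (List.replicate ((max size 0).toNat) (7 : Int)) ≠ [] then
                PySem.List.pySetD matrix x ((List.replicate ((max size 0).toNat) (7 : Int))
                  ++ (PySem.List.pyGetD matrix x []).drop ((List.replicate ((max size 0).toNat) (7 : Int)).length))
              else matrix := rfl
        rw [hA, hB, if_true_and _ _ _ _ rfl]
        exact ycase matrix x size (fun _ => (7 : Int)) _
          (fun hs => (hpy ⟨rfl, by norm_num⟩ hs).1) (fun hs => (hpy ⟨rfl, by norm_num⟩ hs).2)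
          (by rw [hmax]; exact pat_const 7 size.toNat)
      by_cases h11 : int = (-11 : Int)
      · subst h11
        have hA : draw_the_line matrix x size "y" (-11 : Int)
            = ((PySem.List.pyRange 0 size 1).foldl
              (fun (p : List (List Int) × Bool) i =>
                if p.2 then (pvWrite p.1 x i 1, false) else (pvWrite p.1 x i 0, true)) (matrix, true)).1 := rfl
        have hB : draw_the_line_alt matrix x size "y" (-11 : Int)
            = if (("y" : String) = "y") ∧ (((List.replicate ((max size 0).toNat) ([1, 0] : List Int)).flatten).take ((max size 0).toNat)) ≠ [] then
                PySem.List.pySetD matrix x ((((List.replicate ((max size 0).toNat) ([1, 0] : List Int)).flatten).take ((max size 0).toNat))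
                  ++ (PySem.List.pyGetD matrix x []).drop ((((List.replicate ((max size 0).toNat) ([1, 0] : List Int)).flatten).take ((max size 0).toNat)).length))
              else matrix := rfl
        rw [hA, flag_fold (fun m i v => pvWrite m x i v) 1 0 (size - 0).toNat 0 size rfl matrix true (by decide), hB, if_true_and _ _ _ _ rfl]
        exact ycase matrix x size (fun i => if i % 2 = 0 then (1 : Int) else 0) _
          (fun hs => (hpy ⟨rfl, by norm_num⟩ hs).1) (fun hs => (hpy ⟨rfl, by norm_num⟩ hs).2)
          (by rw [hmax]; exact pat_alt 1 0 size.toNat)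
      by_cases h10 : int = (-10 : Int)
      · subst h10
        have hA : draw_the_line matrix x size "y" (-10 : Int)
            = ((PySem.List.pyRange 0 size 1).foldl
              (fun (p : List (List Int) × Bool) i =>
                if p.2 then (pvWrite p.1 x i 0, false) else (pvWrite p.1 x i 1, true)) (matrix, true)).1 := rfl
        have hB : draw_the_line_alt matrix x size "y" (-10 : Int)
            = if (("y" : String) = "y") ∧ (((List.replicate ((max size 0).toNat) ([0, 1] : List Int)).flatten).take ((max size 0).toNat)) ≠ [] then
                PySem.List.pySetD matrix x ((((List.replicate ((max size 0).toNat) ([0, 1] : List Int)).flatten).take ((max size 0).toNat))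
                  ++ (PySem.List.pyGetD matrix x []).drop ((((List.replicate ((max size 0).toNat) ([0, 1] : List Int)).flatten).take ((max size 0).toNat)).length))
              else matrix := rfl
        rw [hA, flag_fold (fun m i v => pvWrite m x i v) 0 1 (size - 0).toNat 0 size rfl matrix true (by decide), hB, if_true_and _ _ _ _ rfl]
        exact ycase matrix x size (fun i => if i % 2 = 0 then (0 : Int) else 1) _
          (fun hs => (hpy ⟨rfl, by norm_num⟩ hs).1) (fun hs => (hpy ⟨rfl, by norm_num⟩ hs).2)
          (by rw [hmax]; exact pat_alt 0 1 size.toNat)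
      unfold draw_the_line draw_the_line_alt
      simp [h0, h1, h7, h11, h10]
    · by_cases h07 : int = 0 ∨ int = 1 ∨ int = 7 <;> by_cases h11 : int = (-11 : Int) <;>
        by_cases h10 : int = (-10 : Int) <;>
          (unfold draw_the_line draw_the_line_alt; simp [hx, hy, h07, h11, h10])
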